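-- pv_equiv track=rewrite | github.com/zixuan-x/algorithms | questions/highly-profitable-months/test_highly_profitable_months.py | highly_profitable_months
-- ===== SOURCE A (Python) =====
-- from typing import List
--
-- def highly_profitable_months(prices: List[int], k: int) -> int:
--     count = 0
--     increasing_length = 0
--     last_price = float("-inf")
--     for price in prices:
--         if price > last_price:
--             increasing_length += 1
--         else:
--             increasing_length = 1
--
--         if increasing_length >= k:
--                 count += 1
--
--         last_price = price
--
--     return count
-- ===== SOURCE B (Python) =====
-- from typing import List
--
-- def highly_profitable_months(prices: List[int], k: int) -> int:
--     # Segment prices into maximal strictly-increasing runs, then add a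
--     # closed-form count per run.
--     runs = []
--     cur = 0
--     last = None
--     for p in prices:
--         if last is None or p > last:
--             cur += 1
--         else:
--             runs.append(cur)
--             cur = 1
--         last = p
--     if cur:
--         runs.append(cur)
--     kk = max(k, 1)
--     return sum(max(0, L - kk + 1) for L in runs)
-- ===== Notes on version B (the rewrite author's own statement) =====
-- stated objective: alternative
-- what changed: Replaced A's per-element counter ('increment count whenever the running increasing length reaches k') by a two-phase pass: segment prices into maximal strictly-increasing runs, then add the closed-form max(0, L - max(k,1) + 1) per run of length L.
import Mathlib
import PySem

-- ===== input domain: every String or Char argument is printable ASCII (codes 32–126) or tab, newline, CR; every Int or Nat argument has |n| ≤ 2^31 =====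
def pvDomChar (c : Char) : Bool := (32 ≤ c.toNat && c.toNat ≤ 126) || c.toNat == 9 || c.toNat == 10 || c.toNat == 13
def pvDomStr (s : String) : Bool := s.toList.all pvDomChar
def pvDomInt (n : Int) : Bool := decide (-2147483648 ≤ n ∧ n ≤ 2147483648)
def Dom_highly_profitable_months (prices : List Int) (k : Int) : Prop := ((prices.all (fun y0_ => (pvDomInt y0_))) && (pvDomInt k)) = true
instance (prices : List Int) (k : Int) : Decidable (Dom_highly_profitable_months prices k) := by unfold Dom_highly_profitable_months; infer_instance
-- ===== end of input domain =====

-- B replaces A's per-element counter by run segmentation plus a closed-form count per run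
-- (objective: alternative; same O(n) cost).

-- ===== PORT A =====
-- State = (count, increasing_length, last_price); 'none' plays float("-inf"):
-- the first comparison 'price > -inf' is always true.
def highly_profitable_months (prices : List Int) (k : Int) : Int :=
  (prices.foldl
    (fun (st : Int × Int × Option Int) price =>
      let count := st.1
      let increasing_length :=
        if (match st.2.2 with | none => true | some l => decide (price > l)) then
          st.2.1 + 1
        else 1
      let count' := if increasing_length ≥ k then count + 1 else count
      (count', increasing_length, some price))
    (0, 0, none)).1

-- ===== PORT B =====
-- Phase 1: segment into maximal strictly-increasing runs; state = (runs, cur, last).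
def hpmSegStep (st : List Int × Int × Option Int) (p : Int) : List Int × Int × Option Int :=
  if (match st.2.2 with | none => true | some l => decide (p > l)) then
    (st.1, st.2.1 + 1, some p)
  else
    (st.1 ++ [st.2.1], 1, some p)

def highly_profitable_months_alt (prices : List Int) (k : Int) : Int :=
  let st := prices.foldl hpmSegStep ([], 0, none)
  let runs := if st.2.1 ≠ 0 then st.1 ++ [st.2.1] else st.1
  let kk := max k 1
  runs.foldl (fun a L => a + max 0 (L - kk + 1)) 0

-- ===== PRECONDITION & SPEC =====
def Spec_highly_profitable_months (prices : List Int) (k : Int) (out : Int) : Prop := out = highly_profitable_months_alt prices k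
instance (prices : List Int) (k : Int) (out : Int) : Decidable (Spec_highly_profitable_months prices k out) := by unfold Spec_highly_profitable_months; infer_instance

-- ===== CLAIM (what is proved, stated in full; the proofs are below) =====
def Claim_equal_highly_profitable_months : Prop := ∀ (prices : List Int) (k : Int), Dom_highly_profitable_months prices k → Spec_highly_profitable_months prices k (highly_profitable_months prices k)

-- ===== LEMMAS AND PROOFS =====

-- A's step and fold with an abstract start state (definitionally A's fold)
def hpmStepA (k : Int) (st : Int × Int × Option Int) (price : Int) : Int × Int × Option Int :=
  let count := st.1
  let increasing_length :=
    if (match st.2.2 with | none => true | some l => decide (price > l)) then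
      st.2.1 + 1
    else 1
  let count' := if increasing_length ≥ k then count + 1 else count
  (count', increasing_length, some price)

def hpmFoldA (k : Int) (ps : List Int) (st : Int × Int × Option Int) : Int × Int × Option Int :=
  ps.foldl (hpmStepA k) st

-- per-run closed-form contribution
def hpmG (k L : Int) : Int := max 0 (L - max k 1 + 1)

lemma hpmStepA_true (k c len p : Int) (last : Option Int)
    (h : (match last with | none => true | some l => decide (p > l)) = true) :
    hpmStepA k (c, len, last) p = ((if len + 1 ≥ k then c + 1 else c), len + 1, some p) := by
  simp [hpmStepA, h]

lemma hpmStepA_false (k c len p : Int) (last : Option Int)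
    (h : (match last with | none => true | some l => decide (p > l)) = false) :
    hpmStepA k (c, len, last) p = ((if (1:Int) ≥ k then c + 1 else c), 1, some p) := by
  simp [hpmStepA, h]

lemma hpmSegStep_true (rs : List Int) (cur p : Int) (last : Option Int)
    (h : (match last with | none => true | some l => decide (p > l)) = true) :
    hpmSegStep (rs, cur, last) p = (rs, cur + 1, some p) := by
  simp [hpmSegStep, h]

lemma hpmSegStep_false (rs : List Int) (cur p : Int) (last : Option Int)
    (h : (match last with | none => true | some l => decide (p > l)) = false) :
    hpmSegStep (rs, cur, last) p = (rs ++ [cur], 1, some p) := by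
  simp [hpmSegStep, h]

lemma hpmFoldA_shift (k : Int) (ps : List Int) : ∀ (c len : Int) (last : Option Int),
    (hpmFoldA k ps (c, len, last)).1 = c + (hpmFoldA k ps (0, len, last)).1 := by
  induction ps with
  | nil => intro c len last; simp [hpmFoldA]
  | cons p ps ih =>
    intro c len last
    rw [show hpmFoldA k (p :: ps) (c, len, last)
          = hpmFoldA k ps (hpmStepA k (c, len, last) p) from rfl,
        show hpmFoldA k (p :: ps) (0, len, last)
          = hpmFoldA k ps (hpmStepA k (0, len, last) p) from rfl]
    cases hb : (match last with | none => true | some l => decide (p > l)) with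
    | true =>
      rw [hpmStepA_true k c len p last hb, hpmStepA_true k 0 len p last hb]
      split_ifs with h1
      · have e1 := ih (c + 1) (len + 1) (some p)
        have e2 := ih (0 + 1) (len + 1) (some p)
        linarith
      · exact ih c (len + 1) (some p)
    | false =>
      rw [hpmStepA_false k c len p last hb, hpmStepA_false k 0 len p last hb]
      split_ifs with h1
      · have e1 := ih (c + 1) 1 (some p)
        have e2 := ih (0 + 1) 1 (some p)
        linarith
      · exact ih c 1 (some p)

lemma hpmSeg_prefix (ps : List Int) : ∀ (rs : List Int) (cur : Int) (last : Option Int),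
    ps.foldl hpmSegStep (rs, cur, last) =
      (rs ++ (ps.foldl hpmSegStep ([], cur, last)).1,
       (ps.foldl hpmSegStep ([], cur, last)).2) := by
  induction ps with
  | nil => intro rs cur last; simp
  | cons p ps ih =>
    intro rs cur last
    rw [List.foldl_cons, List.foldl_cons]
    cases hb : (match last with | none => true | some l => decide (p > l)) with
    | true =>
      rw [hpmSegStep_true rs cur p last hb, hpmSegStep_true [] cur p last hb,
          ih rs, ih ([])]
    | false =>
      rw [hpmSegStep_false rs cur p last hb, hpmSegStep_false [] cur p last hb,
          ih (rs ++ [cur]), ih ([] ++ [cur])]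
      simp

lemma hpmTotal_shift (k : Int) (rs : List Int) : ∀ (a : Int),
    rs.foldl (fun a L => a + max 0 (L - max k 1 + 1)) a =
      a + rs.foldl (fun a L => a + max 0 (L - max k 1 + 1)) 0 := by
  induction rs with
  | nil => intro a; simp
  | cons r rs ih =>
    intro a
    rw [List.foldl_cons, List.foldl_cons, ih, ih (0 + _)]
    ring

-- B's closing total starting from an open run of length cur: runs total + g(cur)
def hpmT (k : Int) (ps : List Int) (cur : Int) (last : Option Int) : Int :=
  ((ps.foldl hpmSegStep ([], cur, last)).1.foldl
      (fun a L => a + max 0 (L - max k 1 + 1)) 0)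
    + hpmG k (ps.foldl hpmSegStep ([], cur, last)).2.1

lemma hpm_main (k : Int) (ps : List Int) : ∀ (len : Int) (last : Option Int), 0 ≤ len →
    (hpmFoldA k ps (0, len, last)).1 + hpmG k len = hpmT k ps len last := by
  induction ps with
  | nil => intro len last _; simp [hpmFoldA, hpmT]
  | cons p ps ih =>
    intro len last hlen
    cases hb : (match last with | none => true | some l => decide (p > l)) with
    | true =>
      have hT : hpmT k (p :: ps) len last = hpmT k ps (len + 1) (some p) := by
        unfold hpmT
        rw [List.foldl_cons, hpmSegStep_true [] len p last hb]
      rw [hT,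
          show hpmFoldA k (p :: ps) (0, len, last)
            = hpmFoldA k ps (hpmStepA k (0, len, last) p) from rfl,
          hpmStepA_true k 0 len p last hb]
      have hF := ih (len + 1) (some p) (by omega)
      have hg : hpmG k (len + 1) = hpmG k len + (if len + 1 ≥ k then (1:Int) else 0) := by
        unfold hpmG; split_ifs <;> omega
      split_ifs with h1
      · simp only [h1, if_pos] at hg
        rw [hpmFoldA_shift]
        linarith
      · simp only [h1, if_false] at hg
        linarith [hF, hg]
    | false =>
      have hT : hpmT k (p :: ps) len last = hpmG k len + hpmT k ps 1 (some p) := by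
        unfold hpmT
        rw [List.foldl_cons, hpmSegStep_false [] len p last hb,
            hpmSeg_prefix ps ([] ++ [len]) 1 (some p)]
        simp only [List.nil_append, List.foldl_append, List.foldl_cons, List.foldl_nil]
        rw [hpmTotal_shift]
        unfold hpmG
        ring
      rw [hT,
          show hpmFoldA k (p :: ps) (0, len, last)
            = hpmFoldA k ps (hpmStepA k (0, len, last) p) from rfl,
          hpmStepA_false k 0 len p last hb]
      have hF := ih 1 (some p) (by omega)
      have hg1 : hpmG k 1 = (if (1:Int) ≥ k then (1:Int) else 0) := by
        unfold hpmG; split_ifs <;> omega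
      split_ifs with h1
      · simp only [h1, if_pos] at hg1
        rw [hpmFoldA_shift]
        linarith
      · simp only [h1, if_false] at hg1
        linarith [hF, hg1]

-- ===== VERDICT (by name: the statement is the Claim_ definition above) =====
theorem highly_profitable_months_spec : Claim_equal_highly_profitable_months := by
  intro prices k _
  show highly_profitable_months prices k = highly_profitable_months_alt prices k
  have hg0 : hpmG k 0 = 0 := by unfold hpmG; omega
  have h := hpm_main k prices 0 none (le_refl 0)
  rw [hg0, add_zero] at h
  have hA : highly_profitable_months prices k = hpmT k prices 0 none := h
  rw [hA]
  show hpmT k prices 0 none =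
    (if (prices.foldl hpmSegStep ([], 0, none)).2.1 ≠ 0
     then (prices.foldl hpmSegStep ([], 0, none)).1 ++ [(prices.foldl hpmSegStep ([], 0, none)).2.1]
     else (prices.foldl hpmSegStep ([], 0, none)).1).foldl
      (fun a L => a + max 0 (L - max k 1 + 1)) 0
  unfold hpmT
  set st := prices.foldl hpmSegStep ([], 0, none) with hst
  by_cases hc : st.2.1 ≠ 0
  · rw [if_pos hc, List.foldl_append, List.foldl_cons, List.foldl_nil]
    unfold hpmG
    ring
  · rw [if_neg hc]
    rw [not_not.mp hc, hg0, add_zero]
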